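-- pv_equiv track=rewrite | github.com/YA-AR/Tetris | strategy_properties.py | get_pites
-- ===== SOURCE A (Python) =====
-- def get_pites(matrix):
--     holes = []
--     for i in range(len(matrix[0])):
--         index = len(matrix)
--         for j in range(len(matrix)):
--             if matrix[j][i] != 0:
--                 index = len(matrix) - j
--                 break
--         holes.append(index)
--     ret = []
--     ret.append(max(0, holes[1] - holes[0]))
--     for i in range(1, len(matrix[0]) - 1):
--         ret.append(max(0, min(holes[i + 1], holes[i - 1]) - holes[i]))
--     ret.append(max(0, holes[-2] - holes[-1]))
--     return ret
-- ===== SOURCE B (Python) =====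
-- def get_pites(matrix):
--     # Row-major bottom-up height discovery (later overwrites win, so the
--     # topmost nonzero of each column lands last), then one uniform padded
--     # well-depth formula instead of A's two end appends + interior loop.
--     n = len(matrix)
--     w = len(matrix[0])
--     heights = [n] * w
--     for j in range(n - 1, -1, -1):
--         row = matrix[j]
--         heights = [n - j if c != 0 else h for c, h in zip(row, heights)]
--     pad = [heights[1]] + heights + [heights[-2]]
--     return [max(0, min(pad[i], pad[i + 2]) - heights[i]) for i in range(w)]
-- ===== Notes on version B (the rewrite author's own statement) =====
-- stated objective: alternative
-- what changed: B finds column heights with a bottom-up row-major sweep over whole rows (later, higher rows overwrite, so no per-column scan-and-break is needed) and computes every well depth with one uniform padded-neighbour formula instead of A's column-major inner loop with break plus two special-cased end appends.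
-- outside the precondition, e.g. on get_pites([[1, 1], [1]]): A returns [0, 0], B raises IndexError
import Mathlib
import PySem

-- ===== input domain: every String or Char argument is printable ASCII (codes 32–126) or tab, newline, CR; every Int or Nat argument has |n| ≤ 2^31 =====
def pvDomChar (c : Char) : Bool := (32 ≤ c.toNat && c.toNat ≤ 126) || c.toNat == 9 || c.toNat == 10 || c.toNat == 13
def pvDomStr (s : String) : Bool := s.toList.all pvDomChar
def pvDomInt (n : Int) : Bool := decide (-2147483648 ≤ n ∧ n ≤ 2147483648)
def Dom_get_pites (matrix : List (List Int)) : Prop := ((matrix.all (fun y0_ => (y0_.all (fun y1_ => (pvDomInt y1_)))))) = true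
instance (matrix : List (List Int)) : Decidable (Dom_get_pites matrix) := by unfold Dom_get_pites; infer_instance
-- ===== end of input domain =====

-- B discovers the column heights with a bottom-up row-major sweep (later rows are
-- overwritten by higher ones, so no per-column break is needed) and computes all well
-- depths with one uniform padded-neighbour formula instead of A's two end appends plus
-- an interior loop. Objective: alternative decomposition, same asymptotic cost.

-- ===== PORT A =====
-- inner 'for j in range(len(matrix)): … break' loop of A
def aInner (matrix : List (List Int)) (i : Int) : List Int → Int
  | [] => (matrix.length : Int)
  | j :: rest =>
    if PySem.List.pyGetD (PySem.List.pyGetD matrix j []) i 0 ≠ 0 then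
      (matrix.length : Int) - j
    else aInner matrix i rest

def get_pites (matrix : List (List Int)) : List Int :=
  let n : Int := (matrix.length : Int)
  let w : Int := ((PySem.List.pyGetD matrix 0 []).length : Int)
  let holes : List Int :=
    (PySem.List.pyRange 0 w 1).foldl
      (fun acc i => acc ++ [aInner matrix i (PySem.List.pyRange 0 n 1)]) []
  let ret : List Int := [max 0 (PySem.List.pyGetD holes 1 0 - PySem.List.pyGetD holes 0 0)]
  let ret := (PySem.List.pyRange 1 (w - 1) 1).foldl
      (fun acc i =>
        acc ++ [max 0 (min (PySem.List.pyGetD holes (i + 1) 0)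
                           (PySem.List.pyGetD holes (i - 1) 0)
                       - PySem.List.pyGetD holes i 0)]) ret
  ret ++ [max 0 (PySem.List.pyGetD holes (-2) 0 - PySem.List.pyGetD holes (-1) 0)]

-- ===== PORT B =====
def get_pites_alt (matrix : List (List Int)) : List Int :=
  let n : Int := (matrix.length : Int)
  let w : Nat := (PySem.List.pyGetD matrix 0 []).length
  let heights : List Int :=
    (PySem.List.pyRange (n - 1) (-1) (-1)).foldl
      (fun hs j =>
        ((PySem.List.pyGetD matrix j []).zip hs).map
          (fun ch => if ch.1 ≠ 0 then n - j else ch.2))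
      (List.replicate w n)
  let pad : List Int :=
    PySem.List.pyGetD heights 1 0 :: heights ++ [PySem.List.pyGetD heights (-2) 0]
  (List.range w).map (fun (i : Nat) =>
    max 0 (min (PySem.List.pyGetD pad (i : Int) 0) (PySem.List.pyGetD pad ((i : Int) + 2) 0)
           - PySem.List.pyGetD heights (i : Int) 0))

-- ===== PRECONDITION & SPEC =====
-- Pre_ excludes the empty matrix and matrices whose first row has fewer than 2 entries
-- (A raises IndexError there), and ragged matrices with some row shorter than row 0,
-- where whether A returns at all depends on accidental break positions while B, written
-- for rectangular grids, raises.
def Pre_get_pites (matrix : List (List Int)) : Prop :=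
  matrix ≠ [] ∧ 2 ≤ (matrix.headD []).length ∧
    ∀ row ∈ matrix, (matrix.headD []).length ≤ row.length
instance (matrix : List (List Int)) : Decidable (Pre_get_pites matrix) := by
  unfold Pre_get_pites; infer_instance

def pvWitness_get_pites : List (List Int) := [[0, 1, 0], [1, 0, 0], [1, 1, 0]]

def Spec_get_pites (matrix : List (List Int)) (out : List Int) : Prop := out = get_pites_alt matrix
instance (matrix : List (List Int)) (out : List Int) : Decidable (Spec_get_pites matrix out) := by unfold Spec_get_pites; infer_instance

-- ===== CLAIM (what is proved, stated in full; the proofs are below) =====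
def Claim_equal_get_pites : Prop := ∀ (matrix : List (List Int)), Dom_get_pites matrix → Pre_get_pites matrix → Spec_get_pites matrix (get_pites matrix)

-- ===== LEMMAS AND PROOFS =====

def bStep (matrix : List (List Int)) (hs : List Int) (j : Int) : List Int :=
  ((PySem.List.pyGetD matrix j []).zip hs).map
    (fun ch => if ch.1 ≠ 0 then (matrix.length : Int) - j else ch.2)

def aInnerD (matrix : List (List Int)) (i : Int) (d : Int) : List Int → Int
  | [] => d
  | j :: rest =>
    if PySem.List.pyGetD (PySem.List.pyGetD matrix j []) i 0 ≠ 0 then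
      (matrix.length : Int) - j
    else aInnerD matrix i d rest

theorem length_bStep (matrix : List (List Int)) (hs : List Int) (j : Int) :
    (bStep matrix hs j).length = min (PySem.List.pyGetD matrix j []).length hs.length := by
  simp [bStep]

theorem getD_bStep (matrix : List (List Int)) (hs : List Int) (j : Int) (i : Nat)
    (h1 : i < (PySem.List.pyGetD matrix j []).length) (h2 : i < hs.length) :
    (bStep matrix hs j).getD i 0 =
      if PySem.List.pyGetD (PySem.List.pyGetD matrix j []) (i : Int) 0 ≠ 0 then
        (matrix.length : Int) - j
      else hs.getD i 0 := by
  have hig : i < (bStep matrix hs j).length := by rw [length_bStep]; omega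
  rw [List.getD_eq_getElem _ _ hig, List.getD_eq_getElem _ _ h2]
  simp only [bStep, List.getElem_map, List.getElem_zip]
  rw [PySem.List.pyGetD_natCast, List.getD_eq_getElem _ _ h1]

theorem bFold_spec (matrix : List (List Int)) (w : Nat)
    (hw : ∀ row ∈ matrix, w ≤ row.length) :
    ∀ (js : List Int) (hs : List Int), hs.length = w →
      (∀ j ∈ js, 0 ≤ j ∧ j < (matrix.length : Int)) →
      (js.foldr (fun j hs => bStep matrix hs j) hs).length = w ∧
      ∀ i : Nat, i < w →
        (js.foldr (fun j hs => bStep matrix hs j) hs).getD i 0 =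
          aInnerD matrix (i : Int) (hs.getD i 0) js := by
  intro js
  induction js with
  | nil => intro hs hlen _; exact ⟨hlen, fun i _ => rfl⟩
  | cons j rest ih =>
    intro hs hlen hmem
    obtain ⟨hlen', hget'⟩ := ih hs hlen (fun j' hj' => hmem j' (List.mem_cons_of_mem _ hj'))
    have hjin := hmem j (by simp)
    have hrow : PySem.List.pyGetD matrix j [] ∈ matrix := by
      apply PySem.List.pyGetD_mem
      simp [PySem.Raise.InRange]; omega
    have hrl : w ≤ (PySem.List.pyGetD matrix j []).length := hw _ hrow
    constructor
    · rw [List.foldr_cons, length_bStep]; omega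
    · intro i hi
      rw [List.foldr_cons, getD_bStep matrix _ j i (by omega) (by omega), aInnerD, hget' i hi]

theorem aInner_eq_aInnerD (matrix : List (List Int)) (i : Int) (js : List Int) :
    aInner matrix i js = aInnerD matrix i (matrix.length : Int) js := by
  induction js with
  | nil => rfl
  | cons j rest ih => simp only [aInner, aInnerD, ih]

theorem get_pites_spec' (matrix : List (List Int))
    (hne : matrix ≠ []) (hw2 : 2 ≤ (matrix.headD []).length)
    (hrows : ∀ row ∈ matrix, (matrix.headD []).length ≤ row.length) :
    get_pites matrix = get_pites_alt matrix := by
  have h0 : PySem.List.pyGetD matrix 0 [] = matrix.headD [] := by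
    cases matrix with
    | nil => exact absurd rfl hne
    | cons a l => simp [PySem.List.pyGetD_zero_cons]
  simp only [get_pites, get_pites_alt, h0,
    PySem.List.foldl_append_singleton_eq_map, List.nil_append,
    PySem.List.pyRange_neg_one_eq_reverse, List.foldl_reverse]
  rw [show ((-1 : Int) + 1) = 0 from by norm_num,
      show ((matrix.length : Int) - 1 + 1) = (matrix.length : Int) from by ring]
  rw [show (fun (x : Int) (y : List Int) =>
        List.map (fun ch => if ch.1 ≠ 0 then (matrix.length : Int) - x else ch.2)
          ((PySem.List.pyGetD matrix x []).zip y))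
      = (fun (x : Int) (y : List Int) => bStep matrix y x) from rfl]
  set n : Int := (matrix.length : Int) with hn
  set w : Nat := (matrix.headD []).length with hw
  set holesL := List.map (fun x => aInner matrix x (PySem.List.pyRange 0 n 1))
      (PySem.List.pyRange 0 (w : Int) 1) with hHoles
  set htL := List.foldr (fun x y => bStep matrix y x) (List.replicate w n)
      (PySem.List.pyRange 0 n 1) with hHt
  have hnw : ∀ row ∈ matrix, w ≤ row.length := hrows
  obtain ⟨hlenHt, hgetHt⟩ := bFold_spec matrix w hnw (PySem.List.pyRange 0 n 1)
      (List.replicate w n) (by simp)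
      (by intro j hj; rw [PySem.List.mem_pyRange_one] at hj; omega)
  rw [← hHt] at hlenHt hgetHt
  have hH : ∀ i : Nat, i < w → htL.getD i 0 = aInner matrix (i : Int) (PySem.List.pyRange 0 n 1) := by
    intro i hi
    rw [hgetHt i hi, aInner_eq_aInnerD, ← hn]
    congr 1
    simp [List.getD_eq_getElem?_getD, hi]
  have hlenHoles : holesL.length = w := by
    simp [hHoles, PySem.List.length_pyRange_one]
  have hKI : ∀ i : Int, 0 ≤ i → i < (w : Int) →
      PySem.List.pyGetD holesL i 0 = aInner matrix i (PySem.List.pyRange 0 n 1) := by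
    intro i p1 p2
    rw [hHoles]
    exact PySem.List.pyGetD_map_pyRange_of_nonneg _ _ i 0 p1 p2
  have hHtI : ∀ i : Int, 0 ≤ i → i < (w : Int) →
      PySem.List.pyGetD htL i 0 = aInner matrix i (PySem.List.pyRange 0 n 1) := by
    intro i p1 p2
    have heq : i = ((i.toNat : Nat) : Int) := by omega
    rw [heq, PySem.List.pyGetD_natCast]
    exact hH i.toNat (by omega)
  have hHtneg2 : PySem.List.pyGetD htL (-2) 0 = aInner matrix ((w : Int) - 2) (PySem.List.pyRange 0 n 1) := by
    rw [PySem.List.pyGetD_neg_ofNat htL 2 0 (by omega) (by omega)]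
    rw [← List.getD_eq_getElem _ 0 (by omega)]
    rw [show htL.length - 2 = w - 2 from by omega, hH (w - 2) (by omega)]
    congr 1; omega
  have hHolesneg : ∀ k : Nat, 0 < k → k ≤ w →
      PySem.List.pyGetD holesL (-(k : Int)) 0 = aInner matrix ((w : Int) - k) (PySem.List.pyRange 0 n 1) := by
    intro k q1 q2
    have hKD : ∀ i : Nat, i < w → holesL.getD i 0 = aInner matrix (i : Int) (PySem.List.pyRange 0 n 1) := by
      intro i hi
      have h' := hKI (i : Int) (by omega) (by omega)
      rwa [PySem.List.pyGetD_natCast] at h'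
    rw [PySem.List.pyGetD_neg_natCast holesL k 0 (by omega) (by omega)]
    rw [← List.getD_eq_getElem _ 0 (by omega)]
    rw [show holesL.length - k = w - k from by omega, hKD (w - k) (by omega)]
    congr 1
    omega
  have hHD : ∀ i : Nat, i < w → htL.getD i 0 = aInner matrix (i : Int) (PySem.List.pyRange 0 n 1) := hH
  set padL := PySem.List.pyGetD htL 1 0 :: htL ++ [PySem.List.pyGetD htL (-2) 0] with hPadL
  have hA1 : PySem.List.pyGetD htL 1 0 = aInner matrix 1 (PySem.List.pyRange 0 n 1) :=
    hHtI 1 (by omega) (by omega)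
  have hPadD : ∀ i : Nat, i < w + 2 → padL.getD i 0 =
      if i = 0 then aInner matrix 1 (PySem.List.pyRange 0 n 1)
      else if i ≤ w then aInner matrix ((i : Int) - 1) (PySem.List.pyRange 0 n 1)
      else aInner matrix ((w : Int) - 2) (PySem.List.pyRange 0 n 1) := by
    intro i hi
    rw [hPadL]
    by_cases hi0 : i = 0
    · subst hi0
      simpa using hA1
    · obtain ⟨i', rfl⟩ : ∃ m, i = m + 1 := ⟨i - 1, by omega⟩
      rw [show (PySem.List.pyGetD htL 1 0 :: htL ++ [PySem.List.pyGetD htL (-2) 0]).getD (i' + 1) 0 = (htL ++ [PySem.List.pyGetD htL (-2) 0]).getD i' 0 from List.getD_cons_succ]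
      by_cases hiw : i' < w
      · rw [List.getD_append _ _ _ _ (by omega), hHD i' hiw]
        simp only [if_neg (by omega : ¬ i' + 1 = 0), if_pos (by omega : i' + 1 ≤ w)]
        congr 1
        push_cast
        ring
      · have hieq : i' = w := by omega
        rw [List.getD_append_right _ _ _ _ (by omega)]
        rw [show i' - htL.length = 0 from by omega]
        simp only [List.getD_cons_zero, hHtneg2]
        rw [if_neg (by omega : ¬ i' + 1 = 0), if_neg (by omega : ¬ i' + 1 ≤ w)]
  apply List.ext_getElem
  · simp only [List.length_append, List.length_map, List.length_cons, List.length_nil,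
      PySem.List.length_pyRange_one, List.length_range]
    omega
  · intro k h1 h2
    simp only [List.length_map, List.length_range] at h2
    rw [List.getElem_map, List.getElem_range]
    rw [PySem.List.pyGetD_natCast, show ((k : Int) + 2) = (((k + 2 : Nat) : Nat) : Int) from by push_cast; ring,
        PySem.List.pyGetD_natCast, PySem.List.pyGetD_natCast]
    by_cases hk0 : k = 0
    · subst hk0
      rw [List.getElem_append_left (by
            simp only [List.length_append, List.length_cons, List.length_nil, List.length_map,
              PySem.List.length_pyRange_one]; omega),
          List.getElem_append_left (by simp)]
      simp only [List.getElem_cons_zero]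
      rw [hKI 1 (by omega) (by omega), hKI 0 (by omega) (by omega)]
      rw [hPadD 0 (by omega), hPadD 2 (by omega), hH 0 (by omega)]
      simp only [if_neg (by omega : ¬ (2:Nat) = 0), if_pos hw2]
      norm_num
    · by_cases hkl : k = w - 1
      · rw [List.getElem_append_right (by
              simp only [List.length_append, List.length_cons, List.length_nil, List.length_map,
                PySem.List.length_pyRange_one]; omega)]
        rw [List.getElem_singleton]
        rw [show ((-2) : Int) = -((2:Nat) : Int) from by norm_num, hHolesneg 2 (by omega) (by omega)]
        rw [show ((-1) : Int) = -((1:Nat) : Int) from by norm_num, hHolesneg 1 (by omega) (by omega)]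
        rw [hPadD k (by omega), hPadD (k + 2) (by omega), hH k (by omega)]
        rw [if_neg hk0, if_pos (by omega : k ≤ w), if_neg (by omega : ¬ (k + 2) = 0),
            if_neg (by omega : ¬ k + 2 ≤ w)]
        subst hkl
        rw [show ((((w : Nat) - 1 : Nat)) : Int) - 1 = (w : Int) - 2 from by omega,
            show ((((w : Nat) - 1 : Nat)) : Int) = (w : Int) - 1 from by omega]
        rw [min_self]
        norm_num
      · -- middle: 1 ≤ k ≤ w - 2
        rw [List.getElem_append_left (by
              simp only [List.length_append, List.length_cons, List.length_nil, List.length_map,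
                PySem.List.length_pyRange_one]; omega),
            List.getElem_append_right (by simp only [List.length_cons, List.length_nil]; omega)]
        rw [List.getElem_map, PySem.List.getElem_pyRange_one]
        rw [show (1 : Int) + ((k - List.length [max 0 (PySem.List.pyGetD holesL 1 0 - PySem.List.pyGetD holesL 0 0)] : Nat) : Int) = (k : Int) from by
              simp only [List.length_cons, List.length_nil]; omega]
        rw [hKI ((k : Int) + 1) (by omega) (by omega), hKI ((k : Int) - 1) (by omega) (by omega),
            hKI (k : Int) (by omega) (by omega)]
        rw [hPadD k (by omega), hPadD (k + 2) (by omega), hH k (by omega)]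
        rw [if_neg hk0, if_pos (by omega : k ≤ w), if_neg (by omega : ¬ (k + 2) = 0),
            if_pos (by omega : k + 2 ≤ w)]
        rw [show (((k + 2 : Nat)) : Int) - 1 = (k : Int) + 1 from by push_cast; ring]
        rw [min_comm]

-- ===== VERDICT (by name: the statement is the Claim_ definition above) =====
theorem get_pites_spec : Claim_equal_get_pites := by
  intro matrix _ hpre
  exact get_pites_spec' matrix hpre.1 hpre.2.1 hpre.2.2
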